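-- pv_equiv track=rewrite | github.com/dip-hue/SCFR_clone | scripts/find_stop_codon_free_regions_with_reverse_gap_report.py | find_gap_regions
-- ===== SOURCE A (Python) =====
-- def find_gap_regions(seq, seq_id):
--     """
--     Identifies regions with 'N' or '-' characters in the sequence.
--
--     Parameters:
--     - seq: Biopython Seq object
--     - seq_id: FASTA record ID
--
--     Returns:
--     - List of tuples: (seq_id, start, end) for each ambiguous region
--     """
--     gap_regions = []
--     in_gap = False
--     start = None
--
--     for i, base in enumerate(seq.upper()):
--         if base in {"N", "-"}:
--             if not in_gap:
--                 in_gap = True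
--                 start = i
--         else:
--             if in_gap:
--                 in_gap = False
--                 gap_regions.append((seq_id, start, i))
--
--     # Handle end of sequence gap
--     if in_gap:
--         gap_regions.append((seq_id, start, len(seq)))
--
--     return gap_regions
-- ===== SOURCE B (Python) =====
-- def find_gap_regions(seq, seq_id):
--     """Two-pointer scan: jump over each maximal run of 'N'/'-' at once."""
--     s = str(seq).upper()
--     n = len(s)
--     out = []
--     i = 0
--     while i < n:
--         if s[i] in "N-":
--             j = i + 1
--             while j < n and s[j] in "N-":
--                 j += 1
--             out.append((seq_id, i, j))
--             i = j
--         else: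
--             i += 1
--     return out
-- ===== Notes on version B (the rewrite author's own statement) =====
-- stated objective: alternative
-- what changed: Replaced A's in_gap/start boolean state machine with trailing flush by a two-pointer scan that, at each gap character, advances an inner pointer to the end of the maximal gap run and emits the span immediately, so no flush or flag state is needed.
import Mathlib
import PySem

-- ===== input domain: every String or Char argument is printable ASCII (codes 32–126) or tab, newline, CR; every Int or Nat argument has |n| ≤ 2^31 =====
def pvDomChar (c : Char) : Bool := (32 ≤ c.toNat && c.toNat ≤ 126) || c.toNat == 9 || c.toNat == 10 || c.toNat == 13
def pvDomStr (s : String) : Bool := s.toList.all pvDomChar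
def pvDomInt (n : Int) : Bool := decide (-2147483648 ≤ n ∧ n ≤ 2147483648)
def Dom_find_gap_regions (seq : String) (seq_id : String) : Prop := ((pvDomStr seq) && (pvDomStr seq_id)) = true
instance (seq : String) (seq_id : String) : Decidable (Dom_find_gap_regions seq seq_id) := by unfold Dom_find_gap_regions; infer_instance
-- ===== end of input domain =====

-- B replaces A's in_gap/start state machine (with trailing flush) by a two-pointer
-- scan that emits each maximal gap run as soon as its end is found: an 'alternative'
-- decomposition, same O(n) cost.

-- ===== PORT A =====
-- base in {"N", "-"}  (seq is uppercased first)
def pvIsGap (c : Char) : Bool := c == 'N' || c == '-'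

-- one iteration of A's for-loop; state = (gap_regions, in_gap, start)
def pvStepA (seq_id : String) (st : List (String × Int × Int) × Bool × Option Int)
    (p : Int × Char) : List (String × Int × Int) × Bool × Option Int :=
  if pvIsGap p.2 then
    if !st.2.1 then (st.1, true, some p.1) else st
  else
    if st.2.1 then (st.1 ++ [(seq_id, st.2.2.getD 0, p.1)], false, st.2.2) else st
    -- start is always `some` when in_gap; .getD 0 is unreachable padding for the Option

def find_gap_regions (seq : String) (seq_id : String) : List (String × Int × Int) :=
  let cs := PySem.Chars.upper seq.toList            -- seq.upper()
  let st := (PySem.List.enumerate cs 0).foldl (pvStepA seq_id) ([], false, none)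
  if st.2.1 then st.1 ++ [(seq_id, st.2.2.getD 0, (seq.toList.length : Int))] else st.1

-- ===== PORT B =====
-- inner while of Source B: number of leading gap chars skipped, and the remaining suffix
def pvSkipGaps : List Char → Nat × List Char
  | [] => (0, [])
  | c :: rest =>
    if pvIsGap c then
      let (k, r) := pvSkipGaps rest
      (k + 1, r)
    else (0, c :: rest)

theorem pvSkipGaps_len_le : ∀ cs : List Char, (pvSkipGaps cs).2.length ≤ cs.length := by
  intro cs
  induction cs with
  | nil => simp [pvSkipGaps]
  | cons c rest ih =>
    simp only [pvSkipGaps]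
    split <;> simp; omega

-- outer while of Source B, ported as recursion over the remaining suffix with absolute index i
def pvScanB (seq_id : String) : List Char → Int → List (String × Int × Int)
  | [], _ => []
  | c :: rest, i =>
    if pvIsGap c then
      let j : Int := i + 1 + ((pvSkipGaps rest).1 : Int)
      (seq_id, i, j) :: pvScanB seq_id (pvSkipGaps rest).2 j
    else pvScanB seq_id rest (i + 1)
termination_by cs _ => cs.length
decreasing_by
  · exact Nat.lt_succ_of_le (pvSkipGaps_len_le rest)
  · simp

def find_gap_regions_alt (seq : String) (seq_id : String) : List (String × Int × Int) :=
  pvScanB seq_id (PySem.Chars.upper seq.toList) 0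

-- ===== PRECONDITION & SPEC =====
def Spec_find_gap_regions (seq : String) (seq_id : String) (out : List (String × Int × Int)) : Prop := out = find_gap_regions_alt seq seq_id
instance (seq : String) (seq_id : String) (out : List (String × Int × Int)) : Decidable (Spec_find_gap_regions seq seq_id out) := by unfold Spec_find_gap_regions; infer_instance

-- ===== CLAIM (what is proved, stated in full; the proofs are below) =====
def Claim_equal_find_gap_regions : Prop := ∀ (seq : String) (seq_id : String), Dom_find_gap_regions seq seq_id → Spec_find_gap_regions seq seq_id (find_gap_regions seq seq_id)

-- ===== LEMMAS AND PROOFS =====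

theorem pvSkipGaps_cons_gap {c : Char} {rest : List Char} (h : pvIsGap c = true) :
    pvSkipGaps (c :: rest) = ((pvSkipGaps rest).1 + 1, (pvSkipGaps rest).2) := by
  simp [pvSkipGaps, h]

-- A's post-loop flush, parametrised by the flush end N
def pvFinish (seq_id : String) (N : Int)
    (st : List (String × Int × Int) × Bool × Option Int) : List (String × Int × Int) :=
  if st.2.1 then st.1 ++ [(seq_id, st.2.2.getD 0, N)] else st.1

theorem pvMain (seq_id : String) : ∀ n (cs : List Char), cs.length = n →
    (∀ (i : Int) (acc : List (String × Int × Int)) (s0 : Option Int),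
      pvFinish seq_id (i + cs.length)
        ((PySem.List.enumerate cs i).foldl (pvStepA seq_id) (acc, false, s0))
      = acc ++ pvScanB seq_id cs i)
    ∧ (∀ (i : Int) (acc : List (String × Int × Int)) (s : Int),
      pvFinish seq_id (i + cs.length)
        ((PySem.List.enumerate cs i).foldl (pvStepA seq_id) (acc, true, some s))
      = acc ++ (seq_id, s, i + ((pvSkipGaps cs).1 : Int))
          :: pvScanB seq_id (pvSkipGaps cs).2 (i + ((pvSkipGaps cs).1 : Int))) := by
  intro n
  induction n using Nat.strong_induction_on with
  | _ n ih =>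
    intro cs hlen
    cases cs with
    | nil =>
      constructor
      · intro i acc s0
        simp [PySem.List.enumerate, pvFinish, pvScanB]
      · intro i acc s
        simp [PySem.List.enumerate, pvFinish, pvScanB, pvSkipGaps]
    | cons c rest =>
      have hrest := ih rest.length (by simp [← hlen]) rest rfl
      by_cases hg : pvIsGap c = true
      · constructor
        · intro i acc s0
          rw [PySem.List.enumerate_cons]
          simp only [List.foldl_cons, pvStepA, hg, if_pos, Bool.not_false]
          have h2 := hrest.2 (i + 1) acc i
          simp only [List.length_cons] at *
          rw [show (i + ((rest.length + 1 : Nat) : Int)) = (i + 1) + (rest.length : Int) by push_cast; ring]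
          rw [h2]
          rw [pvScanB]
          simp only [hg, if_pos]
        · intro i acc s
          rw [PySem.List.enumerate_cons]
          simp only [List.foldl_cons, pvStepA, hg, if_pos, Bool.not_true, Bool.false_eq_true,
            if_false]
          have h2 := hrest.2 (i + 1) acc s
          simp only [List.length_cons] at *
          rw [show (i + ((rest.length + 1 : Nat) : Int)) = (i + 1) + (rest.length : Int) by push_cast; ring]
          rw [h2, pvSkipGaps_cons_gap hg]
          push_cast
          ring_nf
      · constructor
        · intro i acc s0
          rw [PySem.List.enumerate_cons]
          simp only [List.foldl_cons, pvStepA, hg, Bool.false_eq_true, if_false]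
          have h1 := hrest.1 (i + 1) acc s0
          simp only [List.length_cons] at *
          rw [show (i + ((rest.length + 1 : Nat) : Int)) = (i + 1) + (rest.length : Int) by push_cast; ring]
          rw [h1, pvScanB]
          simp [hg]
        · intro i acc s
          rw [PySem.List.enumerate_cons]
          simp only [List.foldl_cons, pvStepA, hg, Bool.false_eq_true, if_false, if_pos]
          have h1 := hrest.1 (i + 1) (acc ++ [(seq_id, s, i)]) (some s)
          simp only [List.length_cons, Option.getD_some] at *
          rw [show (i + ((rest.length + 1 : Nat) : Int)) = (i + 1) + (rest.length : Int) by push_cast; ring]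
          rw [h1]
          simp only [pvSkipGaps, hg, Bool.false_eq_true, if_false]
          rw [pvScanB]
          simp [hg]

theorem pvUpper_length (cs : List Char) : (PySem.Chars.upper cs).length = cs.length := by
  simp [PySem.Chars.upper]

-- ===== VERDICT (by name: the statement is the Claim_ definition above) =====
theorem find_gap_regions_spec : Claim_equal_find_gap_regions := by
  intro seq seq_id _
  unfold Spec_find_gap_regions find_gap_regions find_gap_regions_alt
  have h := (pvMain seq_id (PySem.Chars.upper seq.toList).length (PySem.Chars.upper seq.toList) rfl).1
    0 [] none
  simp only [List.nil_append, zero_add, pvUpper_length] at h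
  rw [← h]
  rfl
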